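-- pv_equiv track=rewrite | github.com/miliar/Code_Jam_Webscraper | solutions_python/Problem_181/1724.py | function
-- ===== SOURCE A (Python) =====
-- def function(liste):
-- 	mot = liste[0]
-- 	result = mot[0]
-- 	compteur = 0
-- 	for c in mot:
-- 		if compteur > 0:
-- 			if ord(c) >= ord(result[0]):
-- 				result = c + result
-- 			else:
-- 				result = result + c
-- 		compteur += 1
-- 	return result
-- ===== SOURCE B (Python) =====
-- def function(liste):
--     mot = liste[0]
--     pm = []
--     m = mot[0]
--     for c in mot:
--         m = m if m > c else c
--         pm.append(m)
--     pairs = list(zip(mot, pm))[1:]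
--     head = ''.join(c for c, p in reversed(pairs) if c == p)
--     tail = ''.join(c for c, p in pairs if c != p)
--     return head + mot[0] + tail
-- ===== Notes on version B (the rewrite author's own statement) =====
-- stated objective: alternative
-- what changed: B replaces A's online prepend/append onto one growing string (whose front char is re-read each step) by staged passes: it precomputes the prefix-maxima list once, then a char belongs to the head iff it equals the prefix maximum at its position, so head and tail are obtained by two independent filters over the zipped (char, prefix-max) pairs and joined once.
import Mathlib
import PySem

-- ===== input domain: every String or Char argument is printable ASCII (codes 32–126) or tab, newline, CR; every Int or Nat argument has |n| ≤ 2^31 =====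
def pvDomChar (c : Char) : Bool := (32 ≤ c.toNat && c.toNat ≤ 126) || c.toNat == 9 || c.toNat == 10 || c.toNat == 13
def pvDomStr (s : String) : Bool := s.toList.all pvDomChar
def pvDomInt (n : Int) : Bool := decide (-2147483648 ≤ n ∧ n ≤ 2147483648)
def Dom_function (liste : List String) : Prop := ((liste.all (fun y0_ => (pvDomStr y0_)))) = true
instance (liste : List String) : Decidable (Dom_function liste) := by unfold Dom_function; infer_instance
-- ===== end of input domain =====

-- B replaces A's online prepend/append onto one growing string by staged passes: precompute the
-- prefix-maxima list once, then head = chars equal to their prefix maximum (taken in reverse),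
-- tail = the others in order; objective: alternative decomposition.

-- ===== PORT A =====
-- A's loop body, on List Char (strings handled via toList/String.mk; exact on all inputs).
-- result[0] is result.headD d; under Pre_ result is always nonempty so the default is never used.
def stepA (d : Char) (st : List Char × Int) (c : Char) : List Char × Int :=
  let result := st.1
  let compteur := st.2
  let result' := if compteur > 0 then
      (if c.toNat ≥ (result.headD d).toNat then c :: result else result ++ [c])
    else result
  (result', compteur + 1)

def function (liste : List String) : String :=
  match liste with
  | [] => ""                       -- Python raises IndexError here; excluded by Pre_
  | mot :: _ =>
    match mot.toList with
    | [] => ""                     -- Python raises IndexError (mot[0]); excluded by Pre_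
    | m0 :: _ =>
      String.mk ((mot.toList.foldl (stepA m0) ([m0], (0 : Int))).1)

-- ===== PORT B =====
-- B pass 1: running maximum m over mot, appending each new m to pm (the prefix-maxima list).
def pmStep (st : Char × List Char) (c : Char) : Char × List Char :=
  let m' := if st.1.toNat > c.toNat then st.1 else c
  (m', st.2 ++ [m'])

def function_alt (liste : List String) : String :=
  match liste with
  | [] => ""                       -- outside Pre_
  | mot :: _ =>
    match mot.toList with
    | [] => ""                     -- outside Pre_
    | m0 :: _ =>
      let pm := (mot.toList.foldl pmStep (m0, [])).2
      let pairs := (mot.toList.zip pm).drop 1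
      let head := (pairs.reverse.filter (fun p => p.1 == p.2)).map Prod.fst
      let tail := (pairs.filter (fun p => !(p.1 == p.2))).map Prod.fst
      String.mk (head ++ m0 :: tail)

-- ===== PRECONDITION & SPEC =====
-- Pre_ excludes exactly the inputs where Python A raises IndexError: the empty list, or a first string that is empty.
def Pre_function (liste : List String) : Prop := liste ≠ [] ∧ liste.headD "" ≠ ""
instance (liste : List String) : Decidable (Pre_function liste) := by unfold Pre_function; infer_instance
def pvWitness_function : List String := ["bca"]

def Spec_function (liste : List String) (out : String) : Prop := out = function_alt liste
instance (liste : List String) (out : String) : Decidable (Spec_function liste out) := by unfold Spec_function; infer_instance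

-- ===== CLAIM (what is proved, stated in full; the proofs are below) =====
def Claim_equal_function : Prop := ∀ (liste : List String), Dom_function liste → Pre_function liste → Spec_function liste (function liste)

-- ===== LEMMAS AND PROOFS =====

-- Common recursive specification: go cm l = (front chars in order, back chars in order).
def go (cm : Char) : List Char → List Char × List Char
  | [] => ([], [])
  | c :: t =>
    if cm.toNat ≤ c.toNat then
      let p := go c t
      (c :: p.1, p.2)
    else
      let p := go cm t
      (p.1, c :: p.2)

-- Once compteur > 0, A's fold ignores the counter: it is the pure fold of step1.
def step1 (d : Char) (res : List Char) (c : Char) : List Char :=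
  if c.toNat ≥ (res.headD d).toNat then c :: res else res ++ [c]

theorem loopA (d : Char) (l : List Char) (res : List Char) (k : Int) (hk : 0 < k) :
    (l.foldl (stepA d) (res, k)).1 = l.foldl (step1 d) res := by
  induction l generalizing res k with
  | nil => rfl
  | cons c t ih =>
    simp only [List.foldl, stepA, step1]
    rw [if_pos hk]
    exact ih _ _ (by omega)

-- A's fold equals the go specification.
theorem loopA_go (d : Char) (rest : List Char) (m0 cm : Char) (f b : List Char)
    (h : (f.reverse ++ m0 :: b).headD d = cm) :
    rest.foldl (step1 d) (f.reverse ++ m0 :: b)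
      = (f ++ (go cm rest).1).reverse ++ m0 :: (b ++ (go cm rest).2) := by
  induction rest generalizing cm f b with
  | nil => simp [go]
  | cons c t ih =>
    simp only [List.foldl, step1, go, h]
    by_cases hc : cm.toNat ≤ c.toNat
    · rw [if_pos (by omega : c.toNat ≥ cm.toNat), if_pos hc]
      have h1 : c :: (f.reverse ++ m0 :: b) = (f ++ [c]).reverse ++ m0 :: b := by simp
      rw [h1, ih c (f ++ [c]) b (by simp)]
      simp
    · rw [if_neg (by omega : ¬ c.toNat ≥ cm.toNat), if_neg hc]
      have h1 : (f.reverse ++ m0 :: b) ++ [c] = f.reverse ++ m0 :: (b ++ [c]) := by simp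
      rw [h1, ih cm f (b ++ [c]) ?_]
      · simp
      · cases fr : f.reverse with
        | nil => simpa [fr] using h
        | cons x xs => simpa [fr] using h

-- B's prefix-maxima fold equals the recursive pmRec.
def pmRec (m : Char) : List Char → List Char
  | [] => []
  | c :: t =>
    let m' := if m.toNat > c.toNat then m else c
    m' :: pmRec m' t

theorem pm_fold (l : List Char) (m : Char) (acc : List Char) :
    (l.foldl pmStep (m, acc)).2 = acc ++ pmRec m l := by
  induction l generalizing m acc with
  | nil => simp [pmRec]
  | cons c t ih =>
    simp only [List.foldl, pmStep, pmRec]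
    rw [ih]
    simp

theorem char_beq_false {c m : Char} (h : c.toNat ≠ m.toNat) : (c == m) = false := by
  apply beq_eq_false_iff_ne.mpr
  intro he; exact h (by rw [he])

-- B's two filters over the zipped (char, prefix-max) pairs equal the go specification.
theorem zip_pm_go (t : List Char) (m : Char) :
    ((t.zip (pmRec m t)).filter (fun p => p.1 == p.2)).map Prod.fst = (go m t).1 ∧
    ((t.zip (pmRec m t)).filter (fun p => !(p.1 == p.2))).map Prod.fst = (go m t).2 := by
  induction t generalizing m with
  | nil => simp [pmRec, go]
  | cons c t ih =>
    simp only [pmRec, go, List.zip_cons_cons]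
    by_cases hc : m.toNat > c.toNat
    · have hne : (c == m) = false := char_beq_false (by omega)
      rw [if_pos hc, if_neg (by omega : ¬ m.toNat ≤ c.toNat)]
      constructor
      · simpa [List.filter, hne] using (ih m).1
      · simpa [List.filter, hne] using (ih m).2
    · rw [if_neg hc, if_pos (by omega : m.toNat ≤ c.toNat)]
      constructor
      · simpa [List.filter] using (ih c).1
      · simpa [List.filter] using (ih c).2

-- ===== VERDICT (by name: the statement is the Claim_ definition above) =====
theorem function_spec : Claim_equal_function := by
  intro liste _ hpre
  obtain ⟨h1, h2⟩ := hpre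
  cases liste with
  | nil => exact absurd rfl h1
  | cons mot rest =>
    simp only [Spec_function, function, function_alt]
    cases hm : mot.toList with
    | nil =>
      exfalso
      apply h2
      have hmot : mot = "" := by
        have := congrArg String.ofList hm
        simpa using this
      simp [hmot]
    | cons m0 tl =>
      dsimp only
      -- A side: reduce to go
      have hstep : List.foldl (stepA m0) ([m0], (0 : Int)) (m0 :: tl)
          = List.foldl (stepA m0) ([m0], (1 : Int)) tl := by
        simp [List.foldl, stepA]
      have hA : ((m0 :: tl).foldl (stepA m0) ([m0], (0 : Int))).1
          = (go m0 tl).1.reverse ++ m0 :: (go m0 tl).2 := by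
        rw [hstep, loopA m0 tl ([m0]) 1 (by omega)]
        have := loopA_go m0 tl m0 m0 [] [] (by simp)
        simpa using this
      -- B side: reduce to go
      have hpm : ((m0 :: tl).foldl pmStep (m0, [])).2 = m0 :: pmRec m0 tl := by
        rw [pm_fold]
        simp [pmRec]
      have hpairs : (((m0 :: tl).zip (((m0 :: tl).foldl pmStep (m0, [])).2)).drop 1)
          = tl.zip (pmRec m0 tl) := by
        rw [hpm]; simp
      obtain ⟨hf, hb⟩ := zip_pm_go tl m0
      rw [hA, hpairs]
      congr 1
      rw [← hf, ← hb]
      rw [List.filter_reverse, List.map_reverse]
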